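-- pv_equiv track=rewrite | github.com/ritesha66863/badminton-app_v1 | fixtures.py | resolve_clash_group_keys
-- ===== SOURCE A (Python) =====
-- from typing import Any, Dict, List, Optional, Tuple
--
-- def _display(group_names: Dict[str, str], key: str) -> str:
--     return str(group_names.get(key, key))
--
-- def resolve_clash_group_keys(
--     clash_key: str,
--     group_keys: List[str],
--     group_names: Dict[str, str],
-- ) -> Tuple[Optional[str], Optional[str]]:
--     """
--     Map a tournament clash_key to internal group keys (handles display names in key).
--     """
--     if "_vs_" not in clash_key:
--         return None, None
--     left, right = clash_key.split("_vs_", 1)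
--
--     def resolve_segment(segment: str) -> Optional[str]:
--         s = (segment or "").strip()
--         for k in group_keys:
--             if str(k) == s:
--                 return k
--         for k in group_keys:
--             if _display(group_names, k) == s:
--                 return k
--         return None
--
--     a = resolve_segment(left)
--     b = resolve_segment(right)
--     if a and b:
--         return a, b
--     return None, None
-- ===== SOURCE B (Python) =====
-- from typing import Dict, List, Optional, Tuple
--
--
-- def resolve_clash_group_keys(
--     clash_key: str,
--     group_keys: List[str],
--     group_names: Dict[str, str],
-- ) -> Tuple[Optional[str], Optional[str]]:
--     """
--     Map a tournament clash_key to internal group keys (handles display names in key).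
--
--     Single pass over group_keys: for each of the two segments keep the best
--     candidate as a (rank, index, key) triple, rank 0 for an exact key match and
--     rank 1 for a display-name match; lexicographic minimality reproduces the
--     exact-before-display, first-occurrence priority.
--     """
--     if "_vs_" not in clash_key:
--         return None, None
--     left, right = clash_key.split("_vs_", 1)
--     targets = (left.strip(), right.strip())
--
--     best: List[Optional[Tuple[int, int, str]]] = [None, None]
--     for idx, k in enumerate(group_keys):
--         display = str(group_names.get(k, k))
--         for t in range(2):
--             s = targets[t]
--             if str(k) == s:
--                 cand = (0, idx, k)
--             elif display == s:
--                 cand = (1, idx, k)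
--             else:
--                 continue
--             if best[t] is None or cand[:2] < best[t][:2]:
--                 best[t] = cand
--
--     a = best[0][2] if best[0] is not None else None
--     b = best[1][2] if best[1] is not None else None
--     if a and b:
--         return a, b
--     return None, None
-- ===== Notes on version B (the rewrite author's own statement) =====
-- stated objective: alternative
-- what changed: B replaces A's four staged linear scans (exact then display, per segment) by one single pass over group_keys that keeps, for each segment, the lexicographically minimal (rank, index) candidate with rank 0 for an exact match and rank 1 for a display-name match; minimising that pair reproduces A's exact-before-display, first-occurrence priority, and the display name is computed once per key instead of once per key per scan.
import Mathlib
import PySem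

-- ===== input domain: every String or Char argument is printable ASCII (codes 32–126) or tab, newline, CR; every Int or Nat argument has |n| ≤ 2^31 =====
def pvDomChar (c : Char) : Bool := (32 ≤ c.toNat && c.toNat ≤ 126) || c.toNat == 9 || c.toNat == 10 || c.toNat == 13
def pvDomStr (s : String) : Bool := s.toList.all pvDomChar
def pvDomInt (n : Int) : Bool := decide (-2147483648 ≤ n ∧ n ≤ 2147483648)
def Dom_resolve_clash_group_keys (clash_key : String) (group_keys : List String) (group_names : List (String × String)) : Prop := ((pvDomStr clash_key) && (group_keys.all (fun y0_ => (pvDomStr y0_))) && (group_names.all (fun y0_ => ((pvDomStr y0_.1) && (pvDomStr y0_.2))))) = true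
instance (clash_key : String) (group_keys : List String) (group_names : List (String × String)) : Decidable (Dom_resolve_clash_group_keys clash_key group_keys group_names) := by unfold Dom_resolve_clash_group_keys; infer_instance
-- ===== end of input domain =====

-- B replaces A's staged exact-then-display scans per segment by ONE pass over
-- group_keys keeping, per segment, the lexicographically minimal (rank, index)
-- candidate (rank 0 exact, rank 1 display name); alternative decomposition.

-- ===== PORT A =====

-- group_names.get(key, key): dict lookup = first match in the association list
def pvLookup (group_names : List (String × String)) (key : String) : Option String :=
  (group_names.find? (fun p => p.1 == key)).map (·.2)

-- _display(group_names, key) = str(group_names.get(key, key)); values are strings so str() is identity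
def pvDisplay (group_names : List (String × String)) (key : String) : String :=
  (pvLookup group_names key).getD key

-- truthiness of an Optional[str]: 'a and b' is truthy iff some non-empty string
def pvTruthy (o : Option String) : Bool :=
  match o with
  | some s => !(s == "")
  | none => false

-- A's resolve_segment: s = (segment or "").strip() — 'segment or ""' is the identity on str;
-- str(k) == s is k == s since the keys are strings
def pvResolveSegA (group_keys : List String) (group_names : List (String × String)) (segment : String) : Option String :=
  let s := PySem.Str.strip segment
  match group_keys.find? (fun k => k == s) with
  | some k => some k
  | none => group_keys.find? (fun k => pvDisplay group_names k == s)

def resolve_clash_group_keys (clash_key : String) (group_keys : List String) (group_names : List (String × String)) : Option String × Option String :=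
  if !(PySem.Str.isIn "_vs_" clash_key) then (none, none)
  else
    match PySem.Str.splitMax? clash_key "_vs_" 1 with
    | some (left :: right :: _) =>
      let a := pvResolveSegA group_keys group_names left
      let b := pvResolveSegA group_keys group_names right
      if pvTruthy a && pvTruthy b then (a, b) else (none, none)
    | _ => (none, none)  -- unreachable: sep ≠ "" and sep occurs, so split gives two pieces

-- ===== PORT B =====

-- B-side copies of the module helpers (kept separate from port A's)
def pvDisplayB (group_names : List (String × String)) (key : String) : String :=
  ((group_names.find? (fun p => p.1 == key)).map (·.2)).getD key

def pvTruthyB (o : Option String) : Bool :=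
  match o with
  | some s => !(s == "")
  | none => false

-- body of B's inner loop for one target: build the candidate (rank, idx, key)
-- (rank 0 = exact match, rank 1 = display match, none = continue), then replace
-- best if best is None or cand[:2] < best[:2] (lexicographic)
def pvUpd (display : String) (s : String) (best : Option (Int × Int × String)) (ik : Int × String) : Option (Int × Int × String) :=
  let cand? : Option (Int × Int × String) :=
    if ik.2 == s then some (0, ik.1, ik.2)
    else if display == s then some (1, ik.1, ik.2)
    else none
  match cand?, best with
  | none, b => b
  | some c, none => some c
  | some c, some b => if c.1 < b.1 ∨ (c.1 = b.1 ∧ c.2.1 < b.2.1) then some c else some b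

-- one iteration of B's single pass: compute the display name once, update both targets
def pvStep (group_names : List (String × String)) (targets : String × String)
    (st : Option (Int × Int × String) × Option (Int × Int × String)) (ik : Int × String) :
    Option (Int × Int × String) × Option (Int × Int × String) :=
  let display := pvDisplayB group_names ik.2
  (pvUpd display targets.1 st.1 ik, pvUpd display targets.2 st.2 ik)

def resolve_clash_group_keys_alt (clash_key : String) (group_keys : List String) (group_names : List (String × String)) : Option String × Option String :=
  if !(PySem.Str.isIn "_vs_" clash_key) then (none, none)
  else
    match PySem.Str.splitMax? clash_key "_vs_" 1 with
    | some (left :: right :: _) =>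
      let targets := (PySem.Str.strip left, PySem.Str.strip right)
      let best := (PySem.List.enumerate group_keys 0).foldl (pvStep group_names targets) (none, none)
      let a := best.1.map (·.2.2)
      let b := best.2.map (·.2.2)
      if pvTruthyB a && pvTruthyB b then (a, b) else (none, none)
    | some [_] => (none, none)  -- unreachable: the separator occurs, so there are two pieces
    | some [] => (none, none)
    | none => (none, none)

-- ===== PRECONDITION & SPEC =====
def Spec_resolve_clash_group_keys (clash_key : String) (group_keys : List String) (group_names : List (String × String)) (out : Option String × Option String) : Prop := out = resolve_clash_group_keys_alt clash_key group_keys group_names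
instance (clash_key : String) (group_keys : List String) (group_names : List (String × String)) (out : Option String × Option String) : Decidable (Spec_resolve_clash_group_keys clash_key group_keys group_names out) := by unfold Spec_resolve_clash_group_keys; infer_instance

-- ===== CLAIM (what is proved, stated in full; the proofs are below) =====
def Claim_equal_resolve_clash_group_keys : Prop := ∀ (clash_key : String) (group_keys : List String) (group_names : List (String × String)), Dom_resolve_clash_group_keys clash_key group_keys group_names → Spec_resolve_clash_group_keys clash_key group_keys group_names (resolve_clash_group_keys clash_key group_keys group_names)

-- ===== LEMMAS AND PROOFS =====

-- single-target version of B's fold, for reasoning about one segment at a time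
def pvFold1 (gn : List (String × String)) (s : String)
    (init : Option (Int × Int × String)) (l : List (Int × String)) : Option (Int × Int × String) :=
  l.foldl (fun b ik => pvUpd (pvDisplayB gn ik.2) s b ik) init

-- the paired fold is the pair of the single-target folds
theorem pvStep_pair (gn : List (String × String)) (t : String × String)
    (l : List (Int × String)) (st : Option (Int × Int × String) × Option (Int × Int × String)) :
    l.foldl (pvStep gn t) st = (pvFold1 gn t.1 st.1 l, pvFold1 gn t.2 st.2 l) := by
  induction l generalizing st with
  | nil => rfl
  | cons ik l ih => simp only [List.foldl, pvFold1] at *; exact ih _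

-- a rank-0 best with a smaller index is never replaced
theorem pvFold1_rank0 (gn : List (String × String)) (s : String) (ks : List String)
    (i i0 : Int) (k0 : String) (h : i0 < i) :
    pvFold1 gn s (some (0, i0, k0)) (PySem.List.enumerate ks i) = some (0, i0, k0) := by
  induction ks generalizing i with
  | nil => simp [pvFold1, PySem.List.enumerate_nil]
  | cons k ks ih =>
    rw [PySem.List.enumerate_cons]
    simp only [pvFold1, List.foldl]
    have hupd : pvUpd (pvDisplayB gn k) s (some (0, i0, k0)) (i, k) = some (0, i0, k0) := by
      unfold pvUpd
      split_ifs <;> simp_all <;> omega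
    rw [hupd]
    exact ih (i + 1) (by omega)

-- a rank-1 best with a smaller index is replaced exactly by the first exact match
theorem pvFold1_rank1 (gn : List (String × String)) (s : String) (ks : List String)
    (i i0 : Int) (k0 : String) (h : i0 < i) :
    (pvFold1 gn s (some (1, i0, k0)) (PySem.List.enumerate ks i)).map (·.2.2) =
      some ((ks.find? (fun k => k == s)).getD k0) := by
  induction ks generalizing i with
  | nil => simp [pvFold1, PySem.List.enumerate_nil]
  | cons k ks ih =>
    rw [PySem.List.enumerate_cons]
    simp only [pvFold1, List.foldl, List.find?]
    by_cases hk : k = s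
    · have hupd : pvUpd (pvDisplayB gn k) s (some (1, i0, k0)) (i, k) = some (0, i, k) := by
        unfold pvUpd; simp [hk]
      rw [hupd]
      have := pvFold1_rank0 gn s ks (i + 1) i k (by omega)
      simp only [pvFold1] at this
      rw [this]
      simp [hk]
    · have hbk : (k == s) = false := by simp [hk]
      have hupd : pvUpd (pvDisplayB gn k) s (some (1, i0, k0)) (i, k) = some (1, i0, k0) := by
        unfold pvUpd
        split_ifs <;> simp_all <;> omega
      rw [hupd, hbk]
      exact ih (i + 1) (by omega)

-- the single-target fold from an empty best computes A's exact-then-display scan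
theorem pvFold1_main (gn : List (String × String)) (s : String) (ks : List String) (i : Int) :
    (pvFold1 gn s none (PySem.List.enumerate ks i)).map (·.2.2) =
      (match ks.find? (fun k => k == s) with
       | some k => some k
       | none => ks.find? (fun k => pvDisplay gn k == s)) := by
  induction ks generalizing i with
  | nil => simp [pvFold1, PySem.List.enumerate_nil]
  | cons k ks ih =>
    rw [PySem.List.enumerate_cons]
    simp only [pvFold1, List.foldl, List.find?]
    by_cases hk : k = s
    · have hupd : pvUpd (pvDisplayB gn k) s none (i, k) = some (0, i, k) := by
        unfold pvUpd; simp [hk]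
      rw [hupd]
      have := pvFold1_rank0 gn s ks (i + 1) i k (by omega)
      simp only [pvFold1] at this
      rw [this]
      simp [hk]
    · have hbk : (k == s) = false := by simp [hk]
      by_cases hd : pvDisplayB gn k = s
      · have hupd : pvUpd (pvDisplayB gn k) s none (i, k) = some (1, i, k) := by
          unfold pvUpd; simp [hk, hd]
        rw [hupd, hbk]
        have := pvFold1_rank1 gn s ks (i + 1) i k (by omega)
        simp only [pvFold1] at this
        rw [this]
        have hdA : (pvDisplay gn k == s) = true := by
          simpa [pvDisplay, pvLookup, pvDisplayB] using hd
        rcases hfe : ks.find? (fun k => k == s) with _ | k' <;> simp [hfe, hdA]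
      · have hupd : pvUpd (pvDisplayB gn k) s none (i, k) = none := by
          unfold pvUpd; simp [hk, hd]
        rw [hupd]
        have hdA : (pvDisplay gn k == s) = false := by
          simpa [pvDisplay, pvLookup, pvDisplayB] using hd
        have hih := ih (i + 1)
        simp only [pvFold1] at hih
        rw [hih]
        simp [hbk, hdA]

-- per-segment agreement of B's single pass with A's staged scans
theorem resolveSeg_eq (group_keys : List String) (group_names : List (String × String))
    (segment : String) :
    (pvFold1 group_names (PySem.Str.strip segment) none (PySem.List.enumerate group_keys 0)).map (·.2.2)
      = pvResolveSegA group_keys group_names segment := by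
  unfold pvResolveSegA
  exact pvFold1_main group_names (PySem.Str.strip segment) group_keys 0

-- ===== VERDICT (by name: the statement is the Claim_ definition above) =====
theorem resolve_clash_group_keys_spec : Claim_equal_resolve_clash_group_keys := by
  intro clash_key group_keys group_names _
  unfold Spec_resolve_clash_group_keys
  unfold resolve_clash_group_keys resolve_clash_group_keys_alt
  cases hin : PySem.Str.isIn "_vs_" clash_key with
  | false => simp [hin]
  | true =>
    simp only [hin, Bool.not_true, Bool.false_eq_true, if_false]
    rcases PySem.Str.splitMax? clash_key "_vs_" 1 with _ | ls
    · rfl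
    · rcases ls with _ | ⟨l, _ | ⟨r, rest⟩⟩
      · rfl
      · rfl
      · simp only [pvStep_pair]
        rw [show pvTruthyB = pvTruthy from rfl, resolveSeg_eq, resolveSeg_eq]
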